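-- pv_equiv track=rewrite | github.com/thecloudcode/WorkHarder | onelast.py | xor_of_smallest_and_second_smallest
-- ===== SOURCE A (Python) =====
-- def xor_of_smallest_and_second_smallest(arr):
--     smallest = float('inf')
--     second_smallest = float('inf')
--     for num in arr:
--         if num < smallest:
--             second_smallest = smallest
--             smallest = num
--         elif num < second_smallest:
--             second_smallest = num
--     return smallest ^ second_smallest
-- ===== SOURCE B (Python) =====
-- def xor_of_smallest_and_second_smallest(arr):
--     vals = sorted(arr)
--     return vals[0] ^ vals[1]
-- ===== Notes on version B (the rewrite author's own statement) =====
-- stated objective: simpler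
-- what changed: Replaces A's single-pass two-sentinel min tracking with sort-then-index: sort the list and XOR its first two elements.
import Mathlib
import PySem

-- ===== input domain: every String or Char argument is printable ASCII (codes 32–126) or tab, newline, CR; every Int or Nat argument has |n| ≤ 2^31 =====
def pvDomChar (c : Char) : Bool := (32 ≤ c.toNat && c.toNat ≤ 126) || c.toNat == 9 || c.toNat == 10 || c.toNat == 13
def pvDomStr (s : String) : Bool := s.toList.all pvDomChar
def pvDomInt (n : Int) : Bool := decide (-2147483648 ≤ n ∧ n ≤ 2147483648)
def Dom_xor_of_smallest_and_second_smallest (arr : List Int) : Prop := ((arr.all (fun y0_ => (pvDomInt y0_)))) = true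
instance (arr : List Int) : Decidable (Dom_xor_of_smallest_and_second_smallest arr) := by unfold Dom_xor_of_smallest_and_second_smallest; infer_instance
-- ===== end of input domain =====

-- B replaces A's single-pass two-sentinel min tracking by sort-then-index (simpler); both raise on lists shorter than 2, excluded by Pre_.


-- ===== PORT A =====
-- the loop body of A: state = (smallest, second_smallest), 'none' playing float('inf')
def pvStep (st : Option Int × Option Int) (num : Int) : Option Int × Option Int :=
  if (match st.1 with | none => true | some v => decide (num < v)) then (some num, st.1)
  else if (match st.2 with | none => true | some v => decide (num < v)) then (st.1, some num)
  else st

-- Python's 'smallest ^ second_smallest' raises TypeError if either is still float('inf');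
-- those inputs are outside Pre_, the port returns 0 there.
def xor_of_smallest_and_second_smallest (arr : List Int) : Int :=
  match arr.foldl pvStep (none, none) with
  | (some a, some b) => PySem.Int.bxor a b
  | _ => 0

-- ===== PORT B =====
-- vals[0] or vals[1] raises IndexError on lists shorter than 2 (outside Pre_); the port returns 0 there.
def xor_of_smallest_and_second_smallest_alt (arr : List Int) : Int :=
  let vals := PySem.List.sorted arr (fun x => x) false
  match PySem.List.pyGet? vals 0 with
  | none => 0
  | some a =>
    match PySem.List.pyGet? vals 1 with
    | none => 0
    | some b => PySem.Int.bxor a b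

-- ===== PRECONDITION & SPEC =====
-- Pre_ excludes lists of length < 2, on which A raises TypeError (int ^ float('inf')).
def Pre_xor_of_smallest_and_second_smallest (arr : List Int) : Prop := 2 ≤ arr.length
instance (arr : List Int) : Decidable (Pre_xor_of_smallest_and_second_smallest arr) := by unfold Pre_xor_of_smallest_and_second_smallest; infer_instance
def pvWitness_xor_of_smallest_and_second_smallest : List Int := [5, 3, 9]

def Spec_xor_of_smallest_and_second_smallest (arr : List Int) (out : Int) : Prop := out = xor_of_smallest_and_second_smallest_alt arr
instance (arr : List Int) (out : Int) : Decidable (Spec_xor_of_smallest_and_second_smallest arr out) := by unfold Spec_xor_of_smallest_and_second_smallest; infer_instance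

-- ===== CLAIM (what is proved, stated in full; the proofs are below) =====
def Claim_equal_xor_of_smallest_and_second_smallest : Prop := ∀ (arr : List Int), Dom_xor_of_smallest_and_second_smallest arr → Pre_xor_of_smallest_and_second_smallest arr → Spec_xor_of_smallest_and_second_smallest arr (xor_of_smallest_and_second_smallest arr)

-- ===== LEMMAS AND PROOFS =====

-- first two elements of a list, as the (smallest, second_smallest) option pair
def pvTwo : List Int → Option Int × Option Int
  | [] => (none, none)
  | [a] => (some a, none)
  | a :: b :: _ => (some a, some b)

-- one step of A = one insertion step of the insertion sort underlying PySem.List.sorted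
lemma pvStep_insertBy (s : List Int) (x : Int) :
    pvStep (pvTwo s) x = pvTwo (PySem.List.insertBy (fun a b => decide (a < b)) x s) := by
  match s with
  | [] => simp [pvStep, pvTwo, PySem.List.insertBy]
  | [a] =>
    by_cases h : x < a <;>
      simp [pvStep, pvTwo, PySem.List.insertBy, h]
  | a :: b :: t =>
    by_cases h1 : x < a
    · simp [pvStep, pvTwo, PySem.List.insertBy, h1]
    · by_cases h2 : x < b <;>
        cases t <;>
          simp [pvStep, pvTwo, PySem.List.insertBy, h1, h2]

lemma pvFold_insert (l acc : List Int) :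
    l.foldl pvStep (pvTwo acc)
      = pvTwo (l.foldl (fun acc x => PySem.List.insertBy (fun a b => decide (a < b)) x acc) acc) := by
  induction l generalizing acc with
  | nil => rfl
  | cons x l ih =>
    simp only [List.foldl_cons, pvStep_insertBy]
    exact ih _

lemma pvFold_sorted (arr : List Int) :
    arr.foldl pvStep (none, none) = pvTwo (PySem.List.sorted arr (fun x => x) false) := by
  have h := pvFold_insert arr []
  simpa [pvTwo, PySem.List.sorted_eq_foldl_insertBy] using h

-- ===== VERDICT (by name: the statement is the Claim_ definition above) =====
theorem xor_of_smallest_and_second_smallest_spec : Claim_equal_xor_of_smallest_and_second_smallest := by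
  intro arr _ hpre
  unfold Spec_xor_of_smallest_and_second_smallest
  unfold xor_of_smallest_and_second_smallest xor_of_smallest_and_second_smallest_alt
  rw [pvFold_sorted]
  have hlen : 2 ≤ (PySem.List.sorted arr (fun x => x) false).length := by
    rwa [PySem.List.length_sorted]
  match hs : PySem.List.sorted arr (fun x => x) false with
  | [] => simp [hs] at hlen
  | [a] => simp [hs] at hlen
  | a :: b :: t =>
    have hpos : (0:Int) ≤ (t.length : Int) + 1 := by positivity
    simp [pvTwo, PySem.List.pyGet?, PySem.List.pyIdx?, hpos]
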